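-- pv_equiv track=rewrite | github.com/FishRaposo/_templatesSB | scripts/generate_feature_and_workflow_tests.py | _camelize
-- ===== SOURCE A (Python) =====
-- from typing import Any, Dict, List, Tuple
--
-- def _camelize(value: str) -> str:
--     parts: List[str] = []
--     buf: List[str] = []
--     for ch in value:
--         if ch.isalnum():
--             buf.append(ch)
--         else:
--             if buf:
--                 parts.append("".join(buf))
--                 buf = []
--     if buf:
--         parts.append("".join(buf))
--
--     out = "".join(p[:1].upper() + p[1:] for p in parts if p)
--     return out or "X"
-- ===== SOURCE B (Python) =====
-- def _camelize(value: str) -> str: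
--     out = []
--     new_word = True
--     for ch in value:
--         if ch.isalnum():
--             out.append(ch.upper() if new_word else ch)
--             new_word = False
--         else:
--             new_word = True
--     return "".join(out) or "X"
-- ===== Notes on version B (the rewrite author's own statement) =====
-- stated objective: simpler
-- what changed: Replaces the two-phase structure (collect word parts into a list, then capitalize-and-join them) with a single streaming pass that emits each character directly, uppercasing it exactly when it starts a new alphanumeric run.
import Mathlib
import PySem

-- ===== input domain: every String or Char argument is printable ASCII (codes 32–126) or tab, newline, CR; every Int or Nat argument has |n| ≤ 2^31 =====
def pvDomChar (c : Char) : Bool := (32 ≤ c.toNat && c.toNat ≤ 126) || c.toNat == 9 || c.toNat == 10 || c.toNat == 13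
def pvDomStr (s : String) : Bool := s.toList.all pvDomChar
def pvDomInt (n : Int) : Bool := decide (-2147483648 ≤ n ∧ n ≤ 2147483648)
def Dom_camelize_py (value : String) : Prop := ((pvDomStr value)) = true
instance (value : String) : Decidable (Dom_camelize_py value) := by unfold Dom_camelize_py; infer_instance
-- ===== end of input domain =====

-- B replaces A's two-phase (collect parts, then capitalize-and-join) structure by one
-- streaming pass emitting each character directly (objective: simpler).

-- ===== PORT A =====
-- p[:1].upper() + p[1:]  (exact by hand: both slice bounds are non-negative, so take/drop)
def pvCapA (p : List Char) : List Char :=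
  PySem.Chars.upper (p.take 1) ++ p.drop 1

def pvStepA (st : List (List Char) × List Char) (ch : Char) : List (List Char) × List Char :=
  if PySem.Chars.isalnum ch then (st.1, st.2 ++ [ch])
  else if st.2 ≠ [] then (st.1 ++ [st.2], []) else st

-- "".join(p[:1].upper() + p[1:] for p in parts if p)
def pvRender (parts : List (List Char)) : List Char :=
  ((parts.filter (fun p => p ≠ [])).map pvCapA).flatten

def camelize_py (value : String) : String :=
  let st := value.toList.foldl pvStepA ([], [])
  let parts := if st.2 ≠ [] then st.1 ++ [st.2] else st.1
  let out := pvRender parts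
  if out = [] then "X" else String.mk out

-- ===== PORT B =====
def pvStepB (st : List Char × Bool) (ch : Char) : List Char × Bool :=
  if PySem.Chars.isalnum ch then
    (st.1 ++ [if st.2 then PySem.Chars.upperChar ch else ch], false)
  else (st.1, true)

def camelize_py_alt (value : String) : String :=
  let st := value.toList.foldl pvStepB ([], true)
  if st.1 = [] then "X" else String.mk st.1

-- ===== PRECONDITION & SPEC =====
def Spec_camelize_py (value : String) (out : String) : Prop := out = camelize_py_alt value
instance (value : String) (out : String) : Decidable (Spec_camelize_py value out) := by unfold Spec_camelize_py; infer_instance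

-- ===== CLAIM (what is proved, stated in full; the proofs are below) =====
def Claim_equal_camelize_py : Prop := ∀ (value : String), Dom_camelize_py value → Spec_camelize_py value (camelize_py value)

-- ===== LEMMAS AND PROOFS =====

lemma pvRender_snoc (parts : List (List Char)) (b : List Char) (hb : b ≠ []) :
    pvRender (parts ++ [b]) = pvRender parts ++ pvCapA b := by
  simp [pvRender, List.filter_append, hb]

lemma pvCapA_snoc (b : List Char) (ch : Char) :
    pvCapA (b ++ [ch]) =
      pvCapA b ++ [if b.isEmpty then PySem.Chars.upperChar ch else ch] := by
  cases b <;> simp [pvCapA, PySem.Chars.upper]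

/-- Loop invariant: finishing A's loop from state (parts, buf) renders exactly the
    output component of B's loop run from the matching state. -/
lemma pv_loop (l : List Char) :
    ∀ (parts : List (List Char)) (buf : List Char),
      pvRender (if (l.foldl pvStepA (parts, buf)).2 ≠ [] then
                  (l.foldl pvStepA (parts, buf)).1 ++ [(l.foldl pvStepA (parts, buf)).2]
                else (l.foldl pvStepA (parts, buf)).1)
        = (l.foldl pvStepB (pvRender parts ++ pvCapA buf, buf.isEmpty)).1 := by
  induction l with
  | nil =>
    intro parts buf
    by_cases hb : buf = []
    · subst hb; simp [pvRender, pvCapA, PySem.Chars.upper]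
    · simp [hb, pvRender_snoc _ _ hb]
  | cons ch l ih =>
    intro parts buf
    by_cases ha : PySem.Chars.isalnum ch
    · have h1 : pvStepA (parts, buf) ch = (parts, buf ++ [ch]) := by
        simp [pvStepA, ha]
      have h2 : pvStepB (pvRender parts ++ pvCapA buf, buf.isEmpty) ch
          = (pvRender parts ++ pvCapA (buf ++ [ch]), (buf ++ [ch]).isEmpty) := by
        simp [pvStepB, ha, pvCapA_snoc]
      simp only [List.foldl_cons, h1, h2]
      exact ih parts (buf ++ [ch])
    · by_cases hb : buf = []
      · subst hb
        have h1 : pvStepA (parts, []) ch = (parts, []) := by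
          simp [pvStepA, ha]
        have h2 : pvStepB (pvRender parts ++ pvCapA ([] : List Char), List.isEmpty ([] : List Char)) ch
            = (pvRender parts ++ pvCapA ([] : List Char), List.isEmpty ([] : List Char)) := by
          simp [pvStepB, ha]
        simp only [List.foldl_cons, h1, h2]
        exact ih parts []
      · have h1 : pvStepA (parts, buf) ch = (parts ++ [buf], []) := by
          simp [pvStepA, ha, hb]
        have h2 : pvStepB (pvRender parts ++ pvCapA buf, buf.isEmpty) ch
            = (pvRender (parts ++ [buf]) ++ pvCapA [], List.isEmpty ([] : List Char)) := by
          simp [pvStepB, ha, pvRender_snoc _ _ hb, pvCapA, PySem.Chars.upper]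
        simp only [List.foldl_cons, h1, h2]
        exact ih (parts ++ [buf]) []

-- ===== VERDICT (by name: the statement is the Claim_ definition above) =====
theorem camelize_py_spec : Claim_equal_camelize_py := by
  intro value _
  show camelize_py value = camelize_py_alt value
  have h := pv_loop value.toList [] []
  have e : pvRender [] ++ pvCapA [] = ([] : List Char) := by
    simp [pvRender, pvCapA, PySem.Chars.upper]
  rw [e] at h
  simp only [camelize_py, camelize_py_alt, List.isEmpty_nil] at h ⊢
  rw [h]
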